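-- pv_equiv track=rewrite | github.com/fgachelin/agregation-PC-python | devUold/NSI_codage_Huffman.py | sequence_to_occurrences
-- ===== SOURCE A (Python) =====
-- def sequence_to_occurrences(seq):
--     d={}
--     for i in range(len(seq)):
--         try:
--             d[seq[i]]=d[seq[i]]+1
--         except:
--             d[seq[i]]=1
--     e={}
--     for k,v in sorted(d.items(),key=lambda x: x[1],reverse=True):
--         e[k]=v
--     return e
-- ===== SOURCE B (Python) =====
-- def sequence_to_occurrences(seq):
--     # Bucket (counting) sort by frequency instead of a comparison sort.
--     counts = {}
--     for ch in seq:
--         counts[ch] = counts.get(ch, 0) + 1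
--     if not counts:
--         return {}
--     m = max(counts.values())
--     buckets = {}
--     for k, v in counts.items():
--         buckets.setdefault(v, []).append(k)
--     e = {}
--     for c in range(m, 0, -1):
--         for k in buckets.get(c, []):
--             e[k] = c
--     return e
-- ===== Notes on version B (the rewrite author's own statement) =====
-- stated objective: alternative
-- what changed: Replaces the stable comparison sort of the count items by a counting/bucket sort: keys are grouped into buckets by their count (filled in the count dict's insertion order, preserving tie order) and emitted from the maximal count down to 1.
import Mathlib
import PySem

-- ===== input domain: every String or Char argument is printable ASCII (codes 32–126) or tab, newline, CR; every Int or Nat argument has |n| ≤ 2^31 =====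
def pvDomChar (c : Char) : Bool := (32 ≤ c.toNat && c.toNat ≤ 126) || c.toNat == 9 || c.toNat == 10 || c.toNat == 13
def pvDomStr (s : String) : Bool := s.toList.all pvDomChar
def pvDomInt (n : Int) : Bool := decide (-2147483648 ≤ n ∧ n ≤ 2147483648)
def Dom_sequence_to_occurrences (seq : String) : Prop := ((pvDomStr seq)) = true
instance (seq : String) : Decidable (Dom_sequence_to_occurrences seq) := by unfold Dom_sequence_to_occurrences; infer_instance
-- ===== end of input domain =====

-- B replaces A's comparison sort of the count items by a counting/bucket sort by frequency (alternative algorithm, same results).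

-- ===== PORT A =====
def sequence_to_occurrences (seq : String) : List (String × Int) :=
  let d : PySem.Dict String Int :=
    (PySem.List.pyRange 0 (PySem.Str.len seq) 1).foldl
      (fun d i =>
        match PySem.Str.pyGet? seq i with
        | some c =>
            -- try: d[seq[i]] = d[seq[i]] + 1 ; except: d[seq[i]] = 1
            match d.get? (String.ofList [c]) with
            | some v => d.insert (String.ofList [c]) (v + 1)
            | none => d.insert (String.ofList [c]) 1
        | none => d)   -- unreachable: i ranges over the valid indices of seq
      PySem.Dict.empty
  let e : PySem.Dict String Int :=
    (PySem.List.sorted d.items (fun x => x.2) true).foldl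
      (fun e kv => e.insert kv.1 kv.2) PySem.Dict.empty
  e.items

-- ===== PORT B =====
def sequence_to_occurrences_alt (seq : String) : List (String × Int) :=
  let counts : PySem.Dict String Int :=
    seq.toList.foldl
      (fun d ch => d.insert (String.ofList [ch]) (d.getD (String.ofList [ch]) 0 + 1))
      PySem.Dict.empty
  match PySem.List.max? counts.values (fun v => v) with
  | none => []   -- 'if not counts: return {}'
  | some m =>
    let buckets : PySem.Dict Int (List String) :=
      counts.items.foldl (fun b kv => b.modify kv.2 [] (· ++ [kv.1])) PySem.Dict.empty
    let e : PySem.Dict String Int :=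
      (PySem.List.pyRange m 0 (-1)).foldl
        (fun e c => (buckets.getD c []).foldl (fun e k => e.insert k c) e)
        PySem.Dict.empty
    e.items

-- ===== PRECONDITION & SPEC =====
def Spec_sequence_to_occurrences (seq : String) (out : List (String × Int)) : Prop := out = sequence_to_occurrences_alt seq
instance (seq : String) (out : List (String × Int)) : Decidable (Spec_sequence_to_occurrences seq out) := by unfold Spec_sequence_to_occurrences; infer_instance

-- ===== CLAIM (what is proved, stated in full; the proofs are below) =====
def Claim_equal_sequence_to_occurrences : Prop := ∀ (seq : String), Dom_sequence_to_occurrences seq → Spec_sequence_to_occurrences seq (sequence_to_occurrences seq)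

-- ===== LEMMAS AND PROOFS =====

-- insertBy passes over a prefix none of whose elements x goes before
theorem insertBy_append_left {α : Type} (before : α → α → Bool) (x : α) (l1 l2 : List α)
    (h : ∀ y ∈ l1, before x y = false) :
    PySem.List.insertBy before x (l1 ++ l2) = l1 ++ PySem.List.insertBy before x l2 := by
  induction l1 with
  | nil => simp
  | cons y t ih =>
      simp only [List.cons_append, PySem.List.insertBy]
      rw [h y (by simp)]
      simp [ih (fun z hz => h z (by simp [hz]))]

-- insertBy puts x in front when x goes before every element
theorem insertBy_front {α : Type} (before : α → α → Bool) (x : α) (l : List α)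
    (h : ∀ y ∈ l, before x y = true) :
    PySem.List.insertBy before x l = x :: l := by
  cases l with
  | nil => rfl
  | cons y t => simp [PySem.List.insertBy, h y (by simp)]

theorem flatMap_congr_mem {α β : Type} (l : List α) (f g : α → List β)
    (h : ∀ c ∈ l, f c = g c) : l.flatMap f = l.flatMap g := by
  induction l with
  | nil => rfl
  | cons c t ih => simp [List.flatMap_cons, h c (by simp), ih (fun z hz => h z (by simp [hz]))]

-- inserting x into descending buckets appends it to its own bucket
theorem insertBy_flatMap {α : Type} (key : α → Int) (x : α) (cs : List Int) (ys : List α)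
    (hp : cs.Pairwise (fun a b => b < a)) (hx : key x ∈ cs) :
    PySem.List.insertBy (fun a b => decide (key b < key a)) x
        (cs.flatMap (fun c => ys.filter (fun y => key y == c)))
      = cs.flatMap (fun c => (ys ++ [x]).filter (fun y => key y == c)) := by
  induction cs with
  | nil => simp at hx
  | cons c cs' ih =>
      have hcgt : ∀ c' ∈ cs', c' < c := (List.pairwise_cons.1 hp).1
      have hp' := (List.pairwise_cons.1 hp).2
      simp only [List.flatMap_cons]
      by_cases hxc : key x = c
      · -- x lands at the end of the bucket for c
        rw [insertBy_append_left _ _ _ _ (by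
          intro y hy
          have : key y = c := by simpa using (List.of_mem_filter hy)
          simp [this, hxc])]
        rw [insertBy_front _ _ _ (by
          intro y hy
          simp only [List.mem_flatMap] at hy
          obtain ⟨c', hc', hy'⟩ := hy
          have : key y = c' := by simpa using (List.of_mem_filter hy')
          simp [this, hxc, hcgt c' hc'])]
        have hbc : (ys ++ [x]).filter (fun y => key y == c)
            = ys.filter (fun y => key y == c) ++ [x] := by
          simp [List.filter_append, hxc]
        have hrest : cs'.flatMap (fun c' => (ys ++ [x]).filter (fun y => key y == c'))
            = cs'.flatMap (fun c' => ys.filter (fun y => key y == c')) := by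
          apply flatMap_congr_mem
          intro c' hc'
          have : key x ≠ c' := by have := hcgt c' hc'; omega
          simp [List.filter_append, this]
        rw [hbc, hrest]
        simp
      · -- x belongs to a later bucket
        have hx' : key x ∈ cs' := by rcases List.mem_cons.1 hx with h | h; exact absurd h hxc; exact h
        have hklt : key x < c := hcgt _ hx'
        rw [insertBy_append_left _ _ _ _ (by
          intro y hy
          have : key y = c := by simpa using (List.of_mem_filter hy)
          simp only [this]
          simpa using not_lt.2 (le_of_lt hklt))]
        have hbc : (ys ++ [x]).filter (fun y => key y == c)
            = ys.filter (fun y => key y == c) := by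
          have : key x ≠ c := hxc
          simp [List.filter_append, this]
        rw [ih hp' hx', hbc]

-- the stable reverse sort by an Int key is the concatenation of the buckets taken in descending key order
theorem sorted_rev_eq_flatMap {α : Type} (key : α → Int) (xs : List α) (cs : List Int)
    (hp : cs.Pairwise (fun a b => b < a)) (hall : ∀ x ∈ xs, key x ∈ cs) :
    PySem.List.sorted xs key true = cs.flatMap (fun c => xs.filter (fun x => key x == c)) := by
  rw [PySem.List.sorted_rev_eq_foldl_insertBy]
  induction xs using List.reverseRecOn with
  | nil => simp
  | append_singleton ys x ih =>
      rw [List.foldl_append]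
      simp only [List.foldl_cons, List.foldl_nil]
      rw [ih (fun z hz => hall z (by simp [hz]))]
      exact insertBy_flatMap key x cs ys hp (hall x (by simp))

theorem pyRange_neg_one (m : Int) (h : 0 ≤ m) :
    PySem.List.pyRange m 0 (-1) = (List.range m.toNat).map (fun k : Nat => m - (k : Int)) := by
  simp only [PySem.List.pyRange]
  rw [if_neg (by norm_num : ¬ (-1 : Int) = 0)]
  rw [if_neg (by norm_num : ¬ (0 : Int) < -1)]
  rcases lt_or_ge 0 m with hm | hm
  · rw [if_pos hm]
    have h2 : ((m - 0 + -(-1) - 1) / -(-1)).toNat = m.toNat := by norm_num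
    rw [h2]
    apply List.map_congr_left
    intro k _
    ring
  · have hm0 : m = 0 := le_antisymm hm h
    subst hm0
    simp

-- the nested insertion loop of B, flattened to a single insertion loop
theorem foldl_foldl_insert {κ ν : Type} [BEq κ] (cs : List ν) (g : ν → List κ)
    (e0 : PySem.Dict κ ν) :
    cs.foldl (fun e c => (g c).foldl (fun e k => e.insert k c) e) e0
      = (cs.flatMap (fun c => (g c).map (fun k => (k, c)))).foldl
          (fun e p => e.insert p.1 p.2) e0 := by
  induction cs generalizing e0 with
  | nil => rfl
  | cons c t ih =>
      simp only [List.flatMap_cons, List.foldl_append, List.foldl_cons, List.foldl_map]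
      exact ih _

-- A's counting loop builds the counter of the one-char strings of seq
theorem d_eq_counter (seq : String) :
    (PySem.List.pyRange 0 (PySem.Str.len seq) 1).foldl
      (fun d i =>
        match PySem.Str.pyGet? seq i with
        | some c =>
            match d.get? (String.ofList [c]) with
            | some v => d.insert (String.ofList [c]) (v + 1)
            | none => d.insert (String.ofList [c]) 1
        | none => d)
      (PySem.Dict.empty : PySem.Dict String Int)
      = PySem.Dict.counter (seq.toList.map (fun c => String.ofList [c])) := by
  have hstep : ∀ (d : PySem.Dict String Int) (c : Char),
      (match d.get? (String.ofList [c]) with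
        | some v => d.insert (String.ofList [c]) (v + 1)
        | none => d.insert (String.ofList [c]) 1)
      = d.insert (String.ofList [c]) (d.getD (String.ofList [c]) 0 + 1) := by
    intro d c
    cases hg : d.get? (String.ofList [c]) with
    | some v => simp [PySem.Dict.getD_of_get?_eq_some d 0 hg]
    | none => simp [PySem.Dict.getD_of_get?_eq_none d 0 hg]
  have hlen : PySem.Str.len seq = PySem.List.len seq.toList := by simp [pysem]
  rw [hlen]
  have hcongr : (PySem.List.pyRange 0 (PySem.List.len seq.toList) 1).foldl
      (fun d i =>
        match PySem.Str.pyGet? seq i with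
        | some c =>
            match d.get? (String.ofList [c]) with
            | some v => d.insert (String.ofList [c]) (v + 1)
            | none => d.insert (String.ofList [c]) 1
        | none => d)
      (PySem.Dict.empty : PySem.Dict String Int)
      = (PySem.List.pyRange 0 (PySem.List.len seq.toList) 1).foldl
        (fun d i => d.insert (String.ofList [PySem.List.pyGetD seq.toList i 'a'])
            (d.getD (String.ofList [PySem.List.pyGetD seq.toList i 'a']) 0 + 1))
        (PySem.Dict.empty : PySem.Dict String Int) := by
    apply PySem.List.foldl_congr_mem
    intro d i hi
    have hi' : 0 ≤ i ∧ i < (seq.toList.length : Int) := by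
      have := PySem.List.mem_pyRange_one.1 hi
      simpa [PySem.List.len] using this
    have hget : PySem.Str.pyGet? seq i = some (seq.toList[i.toNat]'(by omega)) := by
      have h1' : i < (seq.length : Int) := by rw [← String.length_toList]; exact hi'.2
      simp [PySem.Str.pyGet?, PySem.Chars.pyGet?, PySem.List.pyGet?, PySem.List.pyIdx?, hi'.1, h1']
    rw [hget, PySem.List.pyGetD_eq_getElem seq.toList 'a' hi'.1 hi'.2]
    exact hstep d _
  rw [hcongr]
  rw [PySem.List.foldl_pyRange_pyGetD seq.toList 'a'
    (fun d c => d.insert (String.ofList [c]) (d.getD (String.ofList [c]) 0 + 1))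
    (PySem.Dict.empty : PySem.Dict String Int) (le_refl 0)]
  simp only [Int.toNat_zero, List.drop_zero]
  have hmap : seq.toList.foldl
      (fun (d : PySem.Dict String Int) c => d.insert (String.ofList [c]) (d.getD (String.ofList [c]) 0 + 1))
      PySem.Dict.empty
      = (seq.toList.map (fun c => String.ofList [c])).foldl
        (fun (d : PySem.Dict String Int) k => d.insert k (d.getD k 0 + 1)) PySem.Dict.empty :=
    (List.foldl_map (f := fun c => String.ofList [c])
      (g := fun (d : PySem.Dict String Int) k => d.insert k (d.getD k 0 + 1))).symm
  rw [hmap]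
  exact PySem.Dict.foldl_insert_getD_add_one_eq_counter _

-- B's counting loop builds the same counter
theorem counts_eq_counter (seq : String) :
    seq.toList.foldl
      (fun d ch => d.insert (String.ofList [ch]) (d.getD (String.ofList [ch]) 0 + 1))
      (PySem.Dict.empty : PySem.Dict String Int)
      = PySem.Dict.counter (seq.toList.map (fun c => String.ofList [c])) := by
  have hmap : seq.toList.foldl
      (fun (d : PySem.Dict String Int) ch => d.insert (String.ofList [ch]) (d.getD (String.ofList [ch]) 0 + 1))
      PySem.Dict.empty
      = (seq.toList.map (fun c => String.ofList [c])).foldl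
        (fun (d : PySem.Dict String Int) k => d.insert k (d.getD k 0 + 1)) PySem.Dict.empty :=
    (List.foldl_map (f := fun c => String.ofList [c])
      (g := fun (d : PySem.Dict String Int) k => d.insert k (d.getD k 0 + 1))).symm
  rw [hmap]
  exact PySem.Dict.foldl_insert_getD_add_one_eq_counter _

-- B's bucket dict, read back: bucket c holds the keys whose count is c, in insertion order
theorem buckets_getD (items : List (String × Int)) (c : Int) :
    (items.foldl (fun b kv => b.modify kv.2 [] (· ++ [kv.1]))
      (PySem.Dict.empty : PySem.Dict Int (List String))).getD c []
      = (items.filter (fun p => p.2 == c)).map (fun p => p.1) := by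
  have hmap : items.foldl (fun (b : PySem.Dict Int (List String)) kv => b.modify kv.2 [] (· ++ [kv.1]))
      PySem.Dict.empty
      = (items.map Prod.swap).foldl
        (fun (b : PySem.Dict Int (List String)) p => b.modify p.1 [] (· ++ [p.2])) PySem.Dict.empty :=
    (List.foldl_map (f := Prod.swap)
      (g := fun (b : PySem.Dict Int (List String)) p => b.modify p.1 [] (· ++ [p.2]))).symm
  rw [hmap, PySem.Dict.getD_foldl_modify_append]
  simp [List.filter_map, Function.comp_def]

theorem sequence_to_occurrences_eq (seq : String) :
    sequence_to_occurrences seq = sequence_to_occurrences_alt seq := by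
  simp only [sequence_to_occurrences, sequence_to_occurrences_alt]
  rw [d_eq_counter, counts_eq_counter]
  set l := seq.toList.map (fun c => String.ofList [c]) with hl
  set C := PySem.Dict.counter l with hC
  cases hmax : PySem.List.max? C.values (fun v => v) with
  | none =>
      -- empty input: both sides are []
      have hvals : C.values = [] := (PySem.List.max?_eq_none_iff _ _).1 hmax
      have hitems : C.items = [] :=
        List.map_eq_nil_iff.1 (show C.items.map (fun p => p.2) = [] from hvals)
      rw [hitems]
      rfl
  | some m =>
      have hnodup : C.keys.Nodup := PySem.Dict.nodup_keys_counter l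
      have hmaxle : ∀ v ∈ C.values, v ≤ m := by
        intro v hv
        exact PySem.List.max?_isMax hmax v hv
      have hmmem : m ∈ C.values := PySem.List.max?_mem hmax
      have hpos : ∀ p ∈ C.items, 1 ≤ p.2 := by
        intro p hp
        rw [hC, PySem.Dict.items_counter] at hp
        obtain ⟨k, hk, rfl⟩ := List.mem_map.1 hp
        have hkl : k ∈ l := (PySem.Set.mem_ofList _ _).1 hk
        have : 1 ≤ l.count k := List.one_le_count_iff.2 hkl
        simpa using Int.ofNat_le.2 this
      have hm1 : 1 ≤ m := by
        obtain ⟨p, hp, hpv⟩ := List.mem_map.1 hmmem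
        exact hpv ▸ hpos p hp
      have hm0 : 0 ≤ m := le_trans (by norm_num) hm1
      set cs := (List.range m.toNat).map (fun k : Nat => m - (k : Int)) with hcs
      have hrange : PySem.List.pyRange m 0 (-1) = cs := pyRange_neg_one m hm0
      have hcs_pairwise : cs.Pairwise (fun a b => b < a) := by
        rw [hcs, List.pairwise_map]
        exact List.Pairwise.imp (fun {a b} hab => by omega) List.pairwise_lt_range
      have hcs_mem : ∀ v : Int, 1 ≤ v → v ≤ m → v ∈ cs := by
        intro v h1 h2
        rw [hcs]
        have hk : (m - v).toNat ∈ List.range m.toNat := List.mem_range.2 (by omega)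
        exact List.mem_map.2 ⟨(m - v).toNat, hk, by omega⟩
      have hall : ∀ p ∈ C.items, (fun p : String × Int => p.2) p ∈ cs := by
        intro p hp
        exact hcs_mem p.2 (hpos p hp)
          (hmaxle p.2 (List.mem_map.2 ⟨p, hp, rfl⟩))
      -- both sides equal L, the concatenation of the buckets in descending count order
      set L := cs.flatMap (fun c => C.items.filter (fun p => p.2 == c)) with hLdef
      have hsorted : PySem.List.sorted C.items (fun x => x.2) true = L :=
        sorted_rev_eq_flatMap _ _ _ hcs_pairwise hall
      have hLperm : L.Perm C.items := by
        rw [← hsorted]; exact PySem.List.sorted_perm _ _ _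
      have hLnodup : (L.map (fun p => p.1)).Nodup := by
        refine (List.Perm.nodup_iff (List.Perm.map _ hLperm)).2 ?_
        simpa [PySem.Dict.keys] using hnodup
      have hfresh : ∀ p ∈ L, (PySem.Dict.empty : PySem.Dict String Int).contains p.1 = false := by
        intro p _; simp [pysem]
      have hL : L.map (fun p => ((fun p : String × Int => p.1) p, (fun p : String × Int => p.2) p)) = L := by
        simp
      -- A's side
      have hA : ((PySem.List.sorted C.items (fun x => x.2) true).foldl
          (fun e kv => e.insert kv.1 kv.2) (PySem.Dict.empty : PySem.Dict String Int)).items = L := by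
        rw [hsorted]
        rw [PySem.Dict.items_foldl_insert_fresh L (fun p => p.1) (fun p => p.2) _ hfresh hLnodup]
        rw [hL]
        rfl
      -- B's side
      have hB : ((PySem.List.pyRange m 0 (-1)).foldl
          (fun e c => ((C.items.foldl (fun b kv => b.modify kv.2 [] (· ++ [kv.1]))
              (PySem.Dict.empty : PySem.Dict Int (List String))).getD c []).foldl
            (fun e k => e.insert k c) e)
          (PySem.Dict.empty : PySem.Dict String Int)).items = L := by
        rw [hrange, foldl_foldl_insert]
        have hflat : cs.flatMap (fun c =>
            ((C.items.foldl (fun b kv => b.modify kv.2 [] (· ++ [kv.1]))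
              (PySem.Dict.empty : PySem.Dict Int (List String))).getD c []).map (fun k => (k, c))) = L := by
          rw [hLdef]
          apply flatMap_congr_mem
          intro c _
          rw [buckets_getD, List.map_map]
          refine (List.map_congr_left ?_).trans (List.map_id _)
          intro p hp
          have : p.2 = c := by simpa using List.of_mem_filter hp
          simp [← this]
        rw [hflat]
        rw [PySem.Dict.items_foldl_insert_fresh L (fun p => p.1) (fun p => p.2) _ hfresh hLnodup]
        rw [hL]
        rfl
      rw [hA]
      exact hB.symm

-- ===== VERDICT (by name: the statement is the Claim_ definition above) =====
theorem sequence_to_occurrences_spec : Claim_equal_sequence_to_occurrences := by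
  intro seq _
  unfold Spec_sequence_to_occurrences
  exact sequence_to_occurrences_eq seq
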